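-- pv_equiv track=rewrite | github.com/natelson/codes_python_interview | mathematic_questions/palindromeornot.py | number_is_palindrome
-- ===== SOURCE A (Python) =====
-- def number_is_palindrome(N):
--     sum_of_digit = 0
--     for digit in str(N):
--         sum_of_digit += int(digit)
--
--     if str(sum_of_digit) == str(sum_of_digit)[::-1]:
--         return 1
--     else:
--         return 0
-- ===== SOURCE B (Python) =====
-- def number_is_palindrome(N):
--     s = 0
--     n = N
--     while n > 0:
--         s += n % 10
--         n //= 10
--     rev, m = 0, s
--     while m > 0:
--         rev = rev * 10 + m % 10
--         m //= 10
--     return 1 if rev == s else 0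
-- ===== Notes on version B (the rewrite author's own statement) =====
-- stated objective: alternative
-- what changed: Replaces A's string-based pipeline (iterate over str(N), int() each char, compare str(sum) with its slice-reversal) by pure integer arithmetic: a divmod loop sums the digits and a second divmod loop reverses the sum numerically, no string ever built.
import Mathlib
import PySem

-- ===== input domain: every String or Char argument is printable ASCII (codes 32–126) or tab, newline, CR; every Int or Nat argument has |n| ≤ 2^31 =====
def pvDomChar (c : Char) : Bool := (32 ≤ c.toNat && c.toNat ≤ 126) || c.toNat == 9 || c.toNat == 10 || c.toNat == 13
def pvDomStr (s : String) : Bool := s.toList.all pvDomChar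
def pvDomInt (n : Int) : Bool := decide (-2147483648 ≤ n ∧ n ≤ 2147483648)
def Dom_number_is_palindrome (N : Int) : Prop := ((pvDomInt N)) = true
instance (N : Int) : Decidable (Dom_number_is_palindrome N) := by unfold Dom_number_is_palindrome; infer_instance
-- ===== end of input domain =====

-- B replaces A's string-based digit sum and string-reversal palindrome test by two pure
-- integer divmod loops (digit sum, then numeric reversal); same results on all N ≥ 0.

-- ===== PORT A =====
def number_is_palindrome (N : Int) : Int :=
  -- sum_of_digit = 0; for digit in str(N): sum_of_digit += int(digit)
  let sum_of_digit : Int :=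
    (PySem.Int.toStr N).toList.foldl
      (fun acc digit => acc + (PySem.Int.ofChars? [digit]).getD 0) 0
  -- if str(sum_of_digit) == str(sum_of_digit)[::-1]: return 1 else return 0
  if (PySem.Int.toStr sum_of_digit).toList =
     ((PySem.Str.slice? (PySem.Int.toStr sum_of_digit) none none (-1)).getD "").toList
  then 1 else 0

-- ===== PORT B =====
-- while n > 0: s += n % 10; n //= 10   (fuel n.toNat + 1 only makes the loop total; it never runs out)
def pvSumGo : Nat → Int → Int → Int
  | 0, _, s => s
  | f + 1, n, s =>
    if 0 < n then pvSumGo f (PySem.Int.floordiv n 10) (s + PySem.Int.mod n 10) else s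

-- while m > 0: rev = rev * 10 + m % 10; m //= 10
def pvRevGo : Nat → Int → Int → Int
  | 0, _, r => r
  | f + 1, m, r =>
    if 0 < m then pvRevGo f (PySem.Int.floordiv m 10) (r * 10 + PySem.Int.mod m 10) else r

def number_is_palindrome_alt (N : Int) : Int :=
  let s := pvSumGo (N.toNat + 1) N 0
  let rev := pvRevGo (s.toNat + 1) s 0
  if rev = s then 1 else 0

-- ===== PRECONDITION & SPEC =====
-- A raises ValueError on any negative N (int('-') on the sign character), so Pre_ is N ≥ 0.
def Pre_number_is_palindrome (N : Int) : Prop := 0 ≤ N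
instance (N : Int) : Decidable (Pre_number_is_palindrome N) := by unfold Pre_number_is_palindrome; infer_instance
def pvWitness_number_is_palindrome : Int := (19)

def Spec_number_is_palindrome (N : Int) (out : Int) : Prop := out = number_is_palindrome_alt N
instance (N : Int) (out : Int) : Decidable (Spec_number_is_palindrome N out) := by unfold Spec_number_is_palindrome; infer_instance

-- ===== CLAIM (what is proved, stated in full; the proofs are below) =====
def Claim_equal_number_is_palindrome : Prop := ∀ (N : Int), Dom_number_is_palindrome N → Pre_number_is_palindrome N → Spec_number_is_palindrome N (number_is_palindrome N)

-- ===== LEMMAS AND PROOFS =====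

-- Nat.toDigitsCore with enough fuel produces the reversed digitChar list of the digits.
lemma toDigitsCore_eq_digits : ∀ (f n : Nat) (acc : List Char), 0 < n → n < f →
    Nat.toDigitsCore 10 f n acc = ((Nat.digits 10 n).map Nat.digitChar).reverse ++ acc := by
  intro f
  induction f with
  | zero => intro n acc h1 h2; omega
  | succ f ih =>
    intro n acc h1 h2
    rw [Nat.toDigitsCore]
    by_cases h10 : n / 10 = 0
    · have hlt : n < 10 := by omega
      simp [h10, Nat.digits_def' (by norm_num : 1 < 10) h1, Nat.mod_eq_of_lt hlt]
    · have h1' : 0 < n / 10 := Nat.pos_of_ne_zero h10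
      have h2' : n / 10 < f := by
        have := Nat.div_lt_self h1 (by norm_num : 1 < 10)
        omega
      simp only [h10, if_false, ih _ _ h1' h2',
        Nat.digits_def' (by norm_num : 1 < 10) h1, List.map_cons, List.reverse_cons,
        List.append_assoc, List.singleton_append]

lemma toDigits_eq_digits (n : Nat) (h : 0 < n) :
    Nat.toDigits 10 n = ((Nat.digits 10 n).map Nat.digitChar).reverse := by
  rw [Nat.toDigits, toDigitsCore_eq_digits (n + 1) n [] h (Nat.lt_succ_self n), List.append_nil]

lemma digitChar_val (d : Nat) (h : d < 10) :
    (PySem.Int.ofChars? [Nat.digitChar d]).getD 0 = (d : Int) := by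
  interval_cases d <;> decide

-- A's digit-sum loop computes the digit sum.
lemma strSum_eq (N : Int) (h : 0 ≤ N) :
    (PySem.Int.toStr N).toList.foldl
        (fun acc digit => acc + (PySem.Int.ofChars? [digit]).getD 0) 0
      = ((Nat.digits 10 N.toNat).sum : Int) := by
  rw [PySem.Int.toList_toStr, PySem.Int.toChars]
  rw [if_neg (by omega : ¬ N < 0)]
  by_cases h0 : N.toNat = 0
  · rw [h0]; decide
  · rw [toDigits_eq_digits N.toNat (Nat.pos_of_ne_zero h0)]
    rw [List.foldl_reverse]
    have : ∀ (l : List Nat) (a : Int), (∀ d ∈ l, d < 10) →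
        (l.map Nat.digitChar).foldr
          (fun digit acc => acc + (PySem.Int.ofChars? [digit]).getD 0) a
        = a + (l.sum : Int) := by
      intro l
      induction l with
      | nil => intro a _; simp
      | cons d t iht =>
        intro a hd
        simp only [List.map_cons, List.foldr_cons, List.sum_cons]
        rw [iht a (fun x hx => hd x (List.mem_cons_of_mem _ hx)),
          digitChar_val d (hd d List.mem_cons_self), Nat.cast_add]
        ring
    rw [this _ 0 (fun d hd => Nat.digits_lt_base (by norm_num) hd)]
    simp

-- B's digit-sum loop computes the digit sum.
lemma pvSumGo_eq : ∀ (f : Nat) (n s : Int), n.toNat < f →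
    pvSumGo f n s = s + ((Nat.digits 10 n.toNat).sum : Int) := by
  intro f
  induction f with
  | zero => intro n s h; omega
  | succ f ih =>
    intro n s h
    rw [pvSumGo]
    by_cases hn : 0 < n
    · obtain ⟨m, rfl⟩ : ∃ m : Nat, n = (m : Int) := ⟨n.toNat, by omega⟩
      have hm : 0 < m := by exact_mod_cast hn
      have hdiv : PySem.Int.floordiv (m : Int) 10 = ((m / 10 : Nat) : Int) := by
        simp only [PySem.Int.floordiv]; rw [Int.fdiv_eq_ediv]; simp
      have hmod : PySem.Int.mod (m : Int) 10 = ((m % 10 : Nat) : Int) := by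
        simp only [PySem.Int.mod]; rw [Int.fmod_eq_emod]; simp
      rw [if_pos hn, hdiv, hmod, ih]
      · simp only [Int.toNat_natCast]
        rw [Nat.digits_def' (by norm_num : 1 < 10) hm, List.sum_cons, Nat.cast_add]
        ring
      · have : m / 10 < m := Nat.div_lt_self hm (by norm_num)
        simp only [Int.toNat_natCast] at h ⊢
        omega
    · rw [if_neg hn]
      have : n.toNat = 0 := by omega
      rw [this]; simp

-- digit-sum bound: n < 10^k → sum ≤ 9k
lemma digits_sum_le : ∀ (k n : Nat), n < 10 ^ k → (Nat.digits 10 n).sum ≤ 9 * k := by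
  intro k
  induction k with
  | zero => intro n h; interval_cases n; simp
  | succ k ih =>
    intro n h
    by_cases h0 : n = 0
    · simp [h0]
    · rw [Nat.digits_def' (by norm_num : 1 < 10) (Nat.pos_of_ne_zero h0), List.sum_cons]
      have := ih (n / 10) (by
        have : n < 10 * 10 ^ k := by rw [pow_succ] at h; omega
        omega)
      have := Nat.mod_lt n (show 0 < 10 by norm_num)
      omega

-- the two palindrome tests agree on every possible digit sum (≤ 90 for |N| ≤ 2^31)
lemma pal_equiv : ∀ s : Nat, s ≤ 90 →
    ((if (PySem.Int.toStr (s : Int)).toList =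
         ((PySem.Str.slice? (PySem.Int.toStr (s : Int)) none none (-1)).getD "").toList
      then (1 : Int) else 0)
     = (if pvRevGo ((s : Int).toNat + 1) (s : Int) 0 = (s : Int) then (1 : Int) else 0)) := by
  decide

-- ===== VERDICT (by name: the statement is the Claim_ definition above) =====
theorem number_is_palindrome_spec : Claim_equal_number_is_palindrome := by
  intro N hDom hPre
  unfold Spec_number_is_palindrome number_is_palindrome number_is_palindrome_alt
  have hPre' : (0 : Int) ≤ N := hPre
  have hDom' : N ≤ 2147483648 := by
    unfold Dom_number_is_palindrome pvDomInt at hDom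
    simpa using (of_decide_eq_true hDom).2
  set ds : Nat := (Nat.digits 10 N.toNat).sum with hds
  have hbound : ds ≤ 90 := by
    have h10 : N.toNat < 10 ^ 10 := by omega
    have := digits_sum_le 10 N.toNat h10
    omega
  have hA : (PySem.Int.toStr N).toList.foldl
      (fun acc digit => acc + (PySem.Int.ofChars? [digit]).getD 0) 0 = ((ds : Nat) : Int) :=
    strSum_eq N hPre'
  have hB : pvSumGo (N.toNat + 1) N 0 = ((ds : Nat) : Int) := by
    rw [pvSumGo_eq (N.toNat + 1) N 0 (Nat.lt_succ_self _), zero_add]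
  simp only [hA, hB]
  exact pal_equiv ds (by omega)
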